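-- pv_equiv track=rewrite | github.com/jrderuiter/ngs-tk | ngs_tk/tcga.py | parse_tcga_barcode
-- ===== SOURCE A (Python) =====
-- def parse_tcga_barcode(barcode, delimiter='-'):
--     # Define fields and their locations in the barcode.
--     fields = {
--         'project': (0, ),
--         'tss': (1, ),
--         'participant': (2, ),
--         'sample': (3, (0, 2)),
--         'vial': (3, (2, )),
--         'portion': (4, (0, 2)),
--         'analyte': (4, (2, )),
--         'plate': (5, ),
--         'center': (6, )
--     }
--
--     # Split barcode and extract fields.
--     split = barcode.split(delimiter)
--
--     parsed = {}
--     for field, indices in fields.items():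
--         parsed[field] = _extract_field(split, indices)
--
--     return parsed
--
-- def _extract_field(split, indices):
--     try:
--         if len(indices) == 1:
--             value = split[indices[0]]
--         elif len(indices) == 2:
--             ind1, ind2 = indices
--             if len(ind2) == 1:
--                 value = split[ind1][ind2[0]]
--             else:
--                 value = split[ind1][ind2[0]:ind2[1]]
--         return value
--     except IndexError:
--         return None
-- ===== SOURCE B (Python) =====
-- def parse_tcga_barcode(barcode, delimiter='-'):
--     split = barcode.split(delimiter)
--
--     def elem(i):
--         return split[i] if i < len(split) else None
--
--     def char(i, j):
--         s = elem(i)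
--         return s[j] if s is not None and j < len(s) else None
--
--     def sl(i, a, b):
--         s = elem(i)
--         return s[a:b] if s is not None else None
--
--     return {
--         'project': elem(0),
--         'tss': elem(1),
--         'participant': elem(2),
--         'sample': sl(3, 0, 2),
--         'vial': char(3, 2),
--         'portion': sl(4, 0, 2),
--         'analyte': char(4, 2),
--         'plate': elem(5),
--         'center': elem(6),
--     }
-- ===== Notes on version B (the rewrite author's own statement) =====
-- stated objective: simpler
-- what changed: Dropped the fields index table and the generic _extract_field dispatcher; B splits once and builds the dict with nine explicit per-field extractions using three tiny bounds-checked helpers instead of try/except over encoded index tuples.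
import Mathlib
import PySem

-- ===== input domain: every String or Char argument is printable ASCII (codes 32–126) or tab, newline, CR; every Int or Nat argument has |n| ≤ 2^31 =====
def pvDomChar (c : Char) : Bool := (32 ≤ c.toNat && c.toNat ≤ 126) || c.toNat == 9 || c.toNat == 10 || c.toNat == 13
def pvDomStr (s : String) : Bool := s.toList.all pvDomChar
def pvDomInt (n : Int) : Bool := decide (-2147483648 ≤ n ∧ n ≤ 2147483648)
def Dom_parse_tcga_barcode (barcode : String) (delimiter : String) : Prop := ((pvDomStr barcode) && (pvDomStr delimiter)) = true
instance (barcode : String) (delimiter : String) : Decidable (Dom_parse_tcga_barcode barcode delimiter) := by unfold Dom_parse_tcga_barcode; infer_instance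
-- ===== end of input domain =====

-- B replaces A's index table + generic _extract_field helper by one split and nine explicit
-- per-field extractions (objective: simpler). Equivalent on every delimiter ≠ '' (A raises ValueError on '').

-- ===== PORT A =====
-- the 'indices' tuples of A's fields table: (i,), (i, (j,)), (i, (a, b))
inductive PvIdx
  | one : Nat → PvIdx
  | chr : Nat → Nat → PvIdx
  | sl  : Nat → Nat → Nat → PvIdx
deriving DecidableEq, Repr

def pvFields : List (String × PvIdx) :=
  [("project", .one 0), ("tss", .one 1), ("participant", .one 2),
   ("sample", .sl 3 0 2), ("vial", .chr 3 2), ("portion", .sl 4 0 2),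
   ("analyte", .chr 4 2), ("plate", .one 5), ("center", .one 6)]

-- _extract_field: try/except IndexError → none is exactly pyGet? = none
def pvExtractField (split : List String) : PvIdx → Option String
  | .one i => PySem.List.pyGet? split (i : Int)
  | .chr i j =>
      match PySem.List.pyGet? split (i : Int) with
      | none => none
      | some s => (PySem.Str.pyGet? s (j : Int)).map (fun c => String.ofList [c])
  | .sl i a b =>
      match PySem.List.pyGet? split (i : Int) with
      | none => none
      | some s => some (PySem.Str.slice s (some (a : Int)) (some (b : Int)))

def parse_tcga_barcode (barcode : String) (delimiter : String) : List (String × Option String) :=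
  let split := (PySem.Str.split? barcode delimiter).getD []
  (pvFields.foldl (fun d p => d.insert p.1 (pvExtractField split p.2)) PySem.Dict.empty).items

-- ===== PORT B =====
def pvElem (split : List String) (i : Nat) : Option String :=
  if h : i < split.length then some split[i] else none

def pvChar (split : List String) (i j : Nat) : Option String :=
  match pvElem split i with
  | none => none
  | some s => if h : j < s.toList.length then some (String.ofList [s.toList[j]]) else none

def pvSl (split : List String) (i a b : Nat) : Option String :=
  (pvElem split i).map (fun s => PySem.Str.slice s (some (a : Int)) (some (b : Int)))

def parse_tcga_barcode_alt (barcode : String) (delimiter : String) : List (String × Option String) :=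
  let split := (PySem.Str.split? barcode delimiter).getD []
  [("project", pvElem split 0), ("tss", pvElem split 1), ("participant", pvElem split 2),
   ("sample", pvSl split 3 0 2), ("vial", pvChar split 3 2), ("portion", pvSl split 4 0 2),
   ("analyte", pvChar split 4 2), ("plate", pvElem split 5), ("center", pvElem split 6)]

-- ===== PRECONDITION & SPEC =====
-- Pre_ excludes only delimiter = '', where Python's str.split raises ValueError (A returns nothing there).
def Pre_parse_tcga_barcode (barcode : String) (delimiter : String) : Prop := delimiter ≠ ""
instance (barcode : String) (delimiter : String) : Decidable (Pre_parse_tcga_barcode barcode delimiter) := by unfold Pre_parse_tcga_barcode; infer_instance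

def pvWitness_parse_tcga_barcode : String × String := ("TCGA-02-0001-01C-01D-0182-01", "-")

def Spec_parse_tcga_barcode (barcode : String) (delimiter : String) (out : List (String × Option String)) : Prop := out = parse_tcga_barcode_alt barcode delimiter
instance (barcode : String) (delimiter : String) (out : List (String × Option String)) : Decidable (Spec_parse_tcga_barcode barcode delimiter out) := by unfold Spec_parse_tcga_barcode; infer_instance

-- ===== CLAIM (what is proved, stated in full; the proofs are below) =====
def Claim_equal_parse_tcga_barcode : Prop := ∀ (barcode : String) (delimiter : String), Dom_parse_tcga_barcode barcode delimiter → Pre_parse_tcga_barcode barcode delimiter → Spec_parse_tcga_barcode barcode delimiter (parse_tcga_barcode barcode delimiter)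

-- ===== LEMMAS AND PROOFS =====
theorem pvOneAB (xs : List String) (i : Nat) : pvExtractField xs (.one i) = pvElem xs i := by
  simp [pvExtractField, pvElem, getElem?_def]

theorem pvChrAB (xs : List String) (i j : Nat) : pvExtractField xs (.chr i j) = pvChar xs i j := by
  simp only [pvExtractField, pvChar, pvElem, PySem.List.pyGet?_natCast, getElem?_def]
  by_cases h : i < xs.length
  · simp [h, getElem?_def]
  · simp [h]

theorem pvSlAB (xs : List String) (i a b : Nat) : pvExtractField xs (.sl i a b) = pvSl xs i a b := by
  simp only [pvExtractField, pvSl, pvElem, PySem.List.pyGet?_natCast, getElem?_def]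
  by_cases h : i < xs.length
  · simp [h]
  · simp [h]

-- ===== VERDICT (by name: the statement is the Claim_ definition above) =====
theorem parse_tcga_barcode_spec : Claim_equal_parse_tcga_barcode := by
  intro barcode delimiter _hd _hp
  unfold Spec_parse_tcga_barcode parse_tcga_barcode parse_tcga_barcode_alt
  rw [PySem.Dict.items_foldl_insert_fresh pvFields Prod.fst
        (fun p => pvExtractField ((PySem.Str.split? barcode delimiter).getD []) p.2)
        PySem.Dict.empty (by decide) (by decide)]
  simp [pvFields, pvOneAB, pvChrAB, pvSlAB, PySem.Dict.empty]
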